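-- pv_equiv track=rewrite | github.com/cvarpp/PVI_Scripts | TITAN_data.py | make_timepoint
-- ===== SOURCE A (Python) =====
-- def make_timepoint(days):
--     tps = [30, 90, 180, 300]
--     windows = [14, 21, 21, 21]
--     try:
--         if days <= 0:
--             return 'Pre-Dose 3'
--         else:
--             for tp, window in zip(tps, windows):
--                 if abs(days - tp) <= window:
--                     return 'Day {}'.format(tp)
--     except:
--         return "None"
--     return "None"
-- ===== SOURCE B (Python) =====
-- def make_timepoint(days):
--     tps = [30, 90, 180, 300]
--     windows = [14, 21, 21, 21]
--     try:
--         if days <= 0: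
--             return 'Pre-Dose 3'
--         tp, window = min(zip(tps, windows), key=lambda p: abs(days - p[0]))
--         if abs(days - tp) <= window:
--             return 'Day {}'.format(tp)
--     except:
--         return "None"
--     return "None"
-- ===== Notes on version B (the rewrite author's own statement) =====
-- stated objective: alternative
-- what changed: Replaces the first-in-window short-circuit scan with an argmin selection: pick the timepoint with the minimum |days - tp| via min over the zipped pairs, then test only that one against its window (correct because the windows are disjoint).
import Mathlib
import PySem

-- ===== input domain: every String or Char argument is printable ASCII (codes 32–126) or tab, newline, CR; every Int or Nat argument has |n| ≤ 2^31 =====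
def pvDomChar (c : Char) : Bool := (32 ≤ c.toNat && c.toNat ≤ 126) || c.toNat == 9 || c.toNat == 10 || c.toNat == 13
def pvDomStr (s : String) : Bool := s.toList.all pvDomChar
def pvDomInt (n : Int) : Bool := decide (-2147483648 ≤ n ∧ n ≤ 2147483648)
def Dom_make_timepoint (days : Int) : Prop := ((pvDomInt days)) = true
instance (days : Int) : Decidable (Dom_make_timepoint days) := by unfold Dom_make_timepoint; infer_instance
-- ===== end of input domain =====

-- ===== PORT A =====
-- B selects the nearest timepoint by argmin distance instead of scanning for the first in-window match; same values (windows are disjoint).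
def make_timepoint_loop (days : Int) : List (Int × Int) → String
  | [] => "None"
  | (tp, window) :: rest =>
    if |days - tp| ≤ window then "Day " ++ PySem.Int.toStr tp
    else make_timepoint_loop days rest

def make_timepoint (days : Int) : String :=
  if days ≤ 0 then "Pre-Dose 3"
  else make_timepoint_loop days (List.zip [30, 90, 180, 300] [14, 21, 21, 21])

-- ===== PORT B =====
-- Python's min(xs, key=k): first element with minimal key, folded left over the rest
def pyMinBy (key : Int × Int → Int) (b : Int × Int) : List (Int × Int) → Int × Int
  | [] => b
  | q :: rest => pyMinBy key (if key q < key b then q else b) rest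

def make_timepoint_alt (days : Int) : String :=
  if days ≤ 0 then "Pre-Dose 3"
  else
    let best := pyMinBy (fun p => |days - p.1|) (30, 14)
      (List.tail (List.zip [(30 : Int), 90, 180, 300] [(14 : Int), 21, 21, 21]))
    if |days - best.1| ≤ best.2 then "Day " ++ PySem.Int.toStr best.1
    else "None"

-- ===== PRECONDITION & SPEC =====
def Spec_make_timepoint (days : Int) (out : String) : Prop := out = make_timepoint_alt days
instance (days : Int) (out : String) : Decidable (Spec_make_timepoint days out) := by unfold Spec_make_timepoint; infer_instance

-- ===== CLAIM (what is proved, stated in full; the proofs are below) =====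
def Claim_equal_make_timepoint : Prop := ∀ (days : Int), Dom_make_timepoint days → Spec_make_timepoint days (make_timepoint days)

-- ===== LEMMAS AND PROOFS =====

-- ===== VERDICT (by name: the statement is the Claim_ definition above) =====
theorem make_timepoint_spec : Claim_equal_make_timepoint := by
  intro days _
  unfold Spec_make_timepoint make_timepoint make_timepoint_alt
  by_cases h0 : days ≤ 0
  · simp [h0]
  · simp only [h0, if_false, List.zip, List.zipWith, List.tail,
      make_timepoint_loop, pyMinBy, Int.abs_eq_natAbs]
    split_ifs <;> first | rfl | omega
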